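-- pv_equiv track=rewrite | github.com/Daniwave100/CIS-151---Fundamentals-of-Computer-Programming | labs/lab15.py | reorder_words_sentences
-- ===== SOURCE A (Python) =====
-- def reorder_words_sentences(plist: list) -> list:
--     words = []
--     sentences = []
--     final_list = []
--     for item in plist:
--         list2 = item.split(" ")
--         if len(list2) > 1:
--             sentences.append(item)
--         else:
--             words.append(item)
--     final_list = words + sentences
--     return final_list
-- ===== SOURCE B (Python) =====
-- def reorder_words_sentences(plist: list) -> list:
--     # Stable sort by "contains a space": space-free items (key False) come first,
--     # multi-word items (key True) after, each group in original order.
--     return sorted(plist, key=lambda item: " " in item)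
-- ===== Notes on version B (the rewrite author's own statement) =====
-- stated objective: idiomatic
-- what changed: Replaces the two-accumulator classification loop with a single stable sort keyed on whether the item contains a space; stability reproduces the words-then-sentences order exactly.
import Mathlib
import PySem

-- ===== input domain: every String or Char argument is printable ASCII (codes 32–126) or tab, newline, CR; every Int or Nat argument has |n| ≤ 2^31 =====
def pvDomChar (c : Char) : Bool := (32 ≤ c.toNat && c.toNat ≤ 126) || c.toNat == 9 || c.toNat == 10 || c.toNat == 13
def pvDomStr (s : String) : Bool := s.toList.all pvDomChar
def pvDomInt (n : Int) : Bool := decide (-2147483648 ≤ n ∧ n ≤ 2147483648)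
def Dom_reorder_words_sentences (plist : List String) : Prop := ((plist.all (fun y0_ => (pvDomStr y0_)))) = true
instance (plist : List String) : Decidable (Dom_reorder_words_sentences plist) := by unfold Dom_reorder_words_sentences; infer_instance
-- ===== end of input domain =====

-- B replaces A's two-accumulator classification loop with one stable sort keyed on
-- whether the item contains a space (same result; objective: more idiomatic).

-- ===== PORT A =====
def reorder_words_sentences (plist : List String) : List String :=
  let acc := plist.foldl (fun (acc : List String × List String) item =>
      let list2 := (PySem.Str.split? item " ").getD []
      if list2.length > 1 then (acc.1, acc.2 ++ [item]) else (acc.1 ++ [item], acc.2))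
    ([], [])
  acc.1 ++ acc.2

-- ===== PORT B =====
def reorder_words_sentences_alt (plist : List String) : List String :=
  PySem.List.sorted plist (fun item => PySem.Str.isIn " " item)

-- ===== PRECONDITION & SPEC =====
def Spec_reorder_words_sentences (plist : List String) (out : List String) : Prop := out = reorder_words_sentences_alt plist
instance (plist : List String) (out : List String) : Decidable (Spec_reorder_words_sentences plist out) := by unfold Spec_reorder_words_sentences; infer_instance

-- ===== CLAIM (what is proved, stated in full; the proofs are below) =====
def Claim_equal_reorder_words_sentences : Prop := ∀ (plist : List String), Dom_reorder_words_sentences plist → Spec_reorder_words_sentences plist (reorder_words_sentences plist)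

-- ===== LEMMAS AND PROOFS =====

-- length of splitOn.go on a single-char separator: one piece per separator occurrence, plus one
lemma splitOn_go_length (c : Char) :
    ∀ (fuel : Nat) (l cur : List Char) (acc : List (List Char)), l.length ≤ fuel →
      (PySem.Chars.splitOn.go [c] fuel l cur acc).length = acc.length + l.count c + 1 := by
  intro fuel
  induction fuel with
  | zero =>
    intro l cur acc h
    have : l = [] := List.eq_nil_of_length_eq_zero (Nat.le_zero.mp h)
    subst this
    simp [PySem.Chars.splitOn.go, List.count_nil]
  | succ n ih =>
    intro l cur acc h
    cases l with
    | nil => simp [PySem.Chars.splitOn.go, List.count_nil]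
    | cons x rest =>
      by_cases hx : x = c
      · subst hx
        have hpre : List.isPrefixOf [x] (x :: rest) = true := by
          simp [List.isPrefixOf]
        rw [PySem.Chars.splitOn.go]
        simp only [hpre, if_pos]
        have hlen : rest.length ≤ n := by simpa using Nat.succ_le_succ_iff.mp h
        rw [show List.drop (List.length [x]) (x :: rest) = rest by simp]
        rw [ih rest [] (cur.reverse :: acc) hlen]
        simp
        omega
      · have hpre : List.isPrefixOf [c] (x :: rest) = false := by
          simp [List.isPrefixOf]
          exact fun hc => absurd hc.symm hx
        rw [PySem.Chars.splitOn.go]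
        simp only [hpre]
        have hlen : rest.length ≤ n := by simpa using Nat.succ_le_succ_iff.mp h
        rw [if_neg (by simp)]
        rw [ih rest (x :: cur) acc hlen]
        simp [hx]

lemma splitOn_length_single (c : Char) (l : List Char) :
    (PySem.Chars.splitOn l [c]).length = l.count c + 1 := by
  unfold PySem.Chars.splitOn
  rw [splitOn_go_length c (l.length + 1) l [] [] (by omega)]
  simp

-- A's test "len(item.split(' ')) > 1" coincides with B's key "' ' in item"
lemma split_gt_one_iff (s : String) :
    (decide (((PySem.Str.split? s " ").getD []).length > 1)) = PySem.Str.isIn " " s := by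
  have h1 : ((PySem.Str.split? s " ").getD []).length = s.toList.count ' ' + 1 := by
    simp [PySem.Str.split?, PySem.Chars.split?]
    rw [splitOn_length_single]
  by_cases hm : ' ' ∈ s.toList
  · have hin : PySem.Str.isIn " " s = true := by
      rw [PySem.Str.isIn_iff_infix]
      rw [show (" ").toList = [' '] from rfl]
      exact (List.singleton_infix_iff _ _).mpr hm
    rw [hin]
    simp [h1]
    have := List.count_pos_iff.mpr hm
    omega
  · have hin : PySem.Str.isIn " " s = false := by
      rw [← Bool.not_eq_true, PySem.Str.isIn_iff_infix]
      rw [show (" ").toList = [' '] from rfl]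
      simpa [List.singleton_infix_iff] using hm
    rw [hin]
    simp [h1]
    have : s.toList.count ' ' = 0 := List.count_eq_zero.mpr hm
    omega

-- inserting into a false-block ++ true-block keeps the blocks (stable boolean insertion)
lemma insertBy_bool_blocks (key : String → Bool) (x : String) (F T : List String)
    (hF : ∀ a ∈ F, key a = false) (hT : ∀ a ∈ T, key a = true) :
    PySem.List.insertBy (fun a b => decide (key a < key b)) x (F ++ T) =
      if key x then F ++ T ++ [x] else F ++ x :: T := by
  induction F with
  | nil =>
    induction T with
    | nil => cases hkx : key x <;> simp [PySem.List.insertBy]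
    | cons t ts ihT =>
      have ht : key t = true := hT t (by simp)
      cases hkx : key x with
      | false =>
        simp only [List.nil_append, PySem.List.insertBy]
        rw [if_pos (by simp [Bool.lt_iff, hkx, ht])]
        simp
      | true =>
        simp only [List.nil_append, PySem.List.insertBy]
        rw [if_neg (by simp [Bool.lt_iff, hkx])]
        have := ihT (fun a ha => hT a (by simp [ha]))
        simp only [List.nil_append] at this
        simp [this, hkx]
  | cons f fs ihF =>
    have hf : key f = false := hF f (by simp)
    have hrec := ihF (fun a ha => hF a (by simp [ha]))
    simp only [List.cons_append, PySem.List.insertBy]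
    rw [if_neg (by simp [Bool.lt_iff, hf])]
    cases hkx : key x <;> simp [hrec, hkx]

-- the insertion-sort fold with a boolean key partitions stably
lemma foldl_insertBy_bool (key : String → Bool) :
    ∀ (xs F T : List String), (∀ a ∈ F, key a = false) → (∀ a ∈ T, key a = true) →
      xs.foldl (fun acc x => PySem.List.insertBy (fun a b => decide (key a < key b)) x acc) (F ++ T) =
        (F ++ xs.filter (fun a => !key a)) ++ (T ++ xs.filter key) := by
  intro xs
  induction xs with
  | nil => intro F T _ _; simp
  | cons x rest ih =>
    intro F T hF hT
    simp only [List.foldl_cons]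
    rw [insertBy_bool_blocks key x F T hF hT]
    cases hkx : key x with
    | false =>
      rw [if_neg (by simp)]
      have : F ++ x :: T = (F ++ [x]) ++ T := by simp
      rw [this, ih (F ++ [x]) T
        (by intro a ha; rcases List.mem_append.mp ha with h | h
            · exact hF a h
            · simpa [List.mem_singleton.mp h] using hkx) hT]
      simp [hkx]
    | true =>
      rw [if_pos rfl]
      have : F ++ T ++ [x] = F ++ (T ++ [x]) := by simp
      rw [this, ih F (T ++ [x]) hF
        (by intro a ha; rcases List.mem_append.mp ha with h | h
            · exact hT a h
            · simpa [List.mem_singleton.mp h] using hkx)]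
      simp [hkx]

-- B's sort is the stable boolean partition
lemma alt_eq_partition (plist : List String) :
    reorder_words_sentences_alt plist =
      plist.filter (fun a => !PySem.Str.isIn " " a) ++ plist.filter (fun a => PySem.Str.isIn " " a) := by
  unfold reorder_words_sentences_alt
  rw [PySem.List.sorted_eq_foldl_insertBy]
  have := foldl_insertBy_bool (fun item => PySem.Str.isIn " " item) plist [] []
    (by simp) (by simp)
  simpa using this

-- A's loop invariant: the fold extends the two accumulators by the two filters
lemma a_foldl_partition :
    ∀ (xs : List String) (ws ss : List String),
      xs.foldl (fun (acc : List String × List String) item =>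
          let list2 := (PySem.Str.split? item " ").getD []
          if list2.length > 1 then (acc.1, acc.2 ++ [item]) else (acc.1 ++ [item], acc.2))
        (ws, ss) =
      (ws ++ xs.filter (fun a => !PySem.Str.isIn " " a), ss ++ xs.filter (fun a => PySem.Str.isIn " " a)) := by
  intro xs
  induction xs with
  | nil => intro ws ss; simp
  | cons x rest ih =>
    intro ws ss
    simp only [List.foldl_cons]
    have hkey := split_gt_one_iff x
    cases hx : PySem.Str.isIn " " x with
    | false =>
      have hlen : ¬ ((PySem.Str.split? x " ").getD []).length > 1 := by
        rw [hx] at hkey; simpa using of_decide_eq_false hkey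
      have hx' : PySem.Chars.isIn [' '] x.toList = false := by
        simpa [PySem.Str.isIn] using hx
      simp only [if_neg hlen]
      rw [ih]
      simp [hx']
    | true =>
      have hlen : ((PySem.Str.split? x " ").getD []).length > 1 := by
        rw [hx] at hkey; exact of_decide_eq_true hkey
      have hx' : PySem.Chars.isIn [' '] x.toList = true := by
        simpa [PySem.Str.isIn] using hx
      simp only [if_pos hlen]
      rw [ih]
      simp [hx']

-- ===== VERDICT (by name: the statement is the Claim_ definition above) =====
theorem reorder_words_sentences_spec : Claim_equal_reorder_words_sentences := by
  intro plist _
  unfold Spec_reorder_words_sentences reorder_words_sentences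
  rw [a_foldl_partition plist [] [], alt_eq_partition]
  simp
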